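-- pv_equiv track=rewrite | github.com/liyusang1/ProblemSolving | py/2920.py | check
-- ===== SOURCE A (Python) =====
-- def check(list):
--     if list[0] == 1:
--         for i in range(1, len(list)):
--             if list[i] != list[i - 1] + 1:
--                 return 'mixed'
--         return 'ascending'
--     elif list[0] == 8:
--         for i in range(1, len(list)):
--             if list[i] != list[i - 1] - 1:
--                 return 'mixed'
--         return 'descending'
--     else:
--         return 'mixed'
-- ===== SOURCE B (Python) =====
-- def check(list):
--     if list[0] == 1:
--         return 'ascending' if list == [*range(1, len(list) + 1)] else 'mixed'
--     elif list[0] == 8: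
--         return 'descending' if list == [*range(8, 8 - len(list), -1)] else 'mixed'
--     else:
--         return 'mixed'
-- ===== Notes on version B (the rewrite author's own statement) =====
-- stated objective: simpler
-- what changed: Replaces the pairwise adjacency loop with building the canonical expected range and comparing the whole list to it once; Pre_ excludes only the empty list, on which both raise IndexError at list[0].
import Mathlib
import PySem

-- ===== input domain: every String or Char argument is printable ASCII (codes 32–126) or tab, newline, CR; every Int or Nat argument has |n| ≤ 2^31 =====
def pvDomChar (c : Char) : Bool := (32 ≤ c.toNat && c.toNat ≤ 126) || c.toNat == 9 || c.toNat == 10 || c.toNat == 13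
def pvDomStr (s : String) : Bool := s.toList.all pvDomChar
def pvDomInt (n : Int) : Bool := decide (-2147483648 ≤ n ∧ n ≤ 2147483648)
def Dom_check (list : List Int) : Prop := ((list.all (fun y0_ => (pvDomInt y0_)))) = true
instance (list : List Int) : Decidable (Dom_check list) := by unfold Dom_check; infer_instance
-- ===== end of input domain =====

-- B replaces A's pairwise adjacency loop with building the expected range and one whole-list comparison (simpler).
-- Both Pythons raise IndexError on the empty list (list[0]); Pre_ excludes it.

-- ===== PORT A =====
-- the 'for i in range(1, len(list))' loop comparing list[i] with list[i-1] ± 1, carrying the previous element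
def ascLoop (prev : Int) : List Int → String
  | [] => "ascending"
  | x :: xs => if x ≠ prev + 1 then "mixed" else ascLoop x xs

def descLoop (prev : Int) : List Int → String
  | [] => "descending"
  | x :: xs => if x ≠ prev - 1 then "mixed" else descLoop x xs

def check (list : List Int) : String :=
  match list with
  | [] => ""   -- list[0] raises IndexError in Python; excluded by Pre_check
  | h :: t =>
    if h = 1 then ascLoop h t
    else if h = 8 then descLoop h t
    else "mixed"

-- ===== PORT B =====
def check_alt (list : List Int) : String :=
  match list with
  | [] => ""   -- list[0] raises IndexError in Python; excluded by Pre_check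
  | h :: _ =>
    if h = 1 then
      if list = PySem.List.pyRange 1 ((list.length : Int) + 1) 1 then "ascending" else "mixed"
    else if h = 8 then
      if list = PySem.List.pyRange 8 (8 - (list.length : Int)) (-1) then "descending" else "mixed"
    else "mixed"

-- ===== PRECONDITION & SPEC =====
-- Pre_ excludes exactly the empty list, on which Python's list[0] raises IndexError.
def Pre_check (list : List Int) : Prop := list ≠ []
instance (list : List Int) : Decidable (Pre_check list) := by unfold Pre_check; infer_instance
def pvWitness_check : List Int := ([1, 2, 3] : List Int)
def Spec_check (list : List Int) (out : String) : Prop := out = check_alt list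
instance (list : List Int) (out : String) : Decidable (Spec_check list out) := by unfold Spec_check; infer_instance

-- ===== CLAIM (what is proved, stated in full; the proofs are below) =====
def Claim_equal_check : Prop := ∀ (list : List Int), Dom_check list → Pre_check list → Spec_check list (check list)

-- ===== LEMMAS AND PROOFS =====

lemma ascLoop_eq_or (prev : Int) (t : List Int) :
    ascLoop prev t = "ascending" ∨ ascLoop prev t = "mixed" := by
  induction t generalizing prev with
  | nil => left; rfl
  | cons x xs ih =>
    by_cases h : x = prev + 1
    · simpa [ascLoop, h] using ih x
    · right; simp [ascLoop, h]

lemma descLoop_eq_or (prev : Int) (t : List Int) :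
    descLoop prev t = "descending" ∨ descLoop prev t = "mixed" := by
  induction t generalizing prev with
  | nil => left; rfl
  | cons x xs ih =>
    by_cases h : x = prev - 1
    · simpa [descLoop, h] using ih x
    · right; simp [descLoop, h]

lemma asc_iff (t : List Int) (a : Int) :
    ascLoop a t = "ascending" ↔ a :: t = PySem.List.pyRange a (a + 1 + t.length) 1 := by
  induction t generalizing a with
  | nil =>
    simp [ascLoop, PySem.List.pyRange_one_singleton]
  | cons x xs ih =>
    have h0 : (0 : Int) ≤ (((x :: xs).length : Nat) : Int) := Int.natCast_nonneg _
    have hlt : a < a + 1 + ((x :: xs).length : Int) := by omega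
    rw [PySem.List.pyRange_one_cons hlt]
    by_cases h : x = a + 1
    · subst h
      have harith : a + 1 + (((a + 1) :: xs).length : Int) = (a + 1) + 1 + (xs.length : Int) := by
        simp only [List.length_cons]; push_cast; ring
      rw [harith]
      simpa [ascLoop] using ih (a + 1)
    · constructor
      · intro hc; simp [ascLoop, h] at hc
      · intro hc
        have hx : x :: xs = PySem.List.pyRange (a + 1) (a + 1 + ((x :: xs).length : Int)) 1 := by
          simpa using hc
        have h1 : (0 : Int) < ((x :: xs).length : Int) := by
          simp
        have hlt2 : a + 1 < a + 1 + ((x :: xs).length : Int) := by omega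
        rw [PySem.List.pyRange_one_cons hlt2] at hx
        exact absurd (by simpa using congrArg (fun l => l.headD 0) hx) h

lemma desc_iff (t : List Int) (a : Int) :
    descLoop a t = "descending" ↔ a :: t = PySem.List.pyRange a (a - 1 - t.length) (-1) := by
  induction t generalizing a with
  | nil =>
    rw [show a - 1 - ((List.length ([] : List Int) : Nat) : Int) = a - 1 by simp]
    rw [PySem.List.pyRange_neg_one_cons (show a - 1 < a by omega),
        PySem.List.pyRange_neg_one_eq_nil (le_refl (a - 1))]
    simp [descLoop]
  | cons x xs ih =>
    have h0 : (0 : Int) ≤ (((x :: xs).length : Nat) : Int) := Int.natCast_nonneg _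
    have hlt : a - 1 - ((x :: xs).length : Int) < a := by omega
    rw [PySem.List.pyRange_neg_one_cons hlt]
    by_cases h : x = a - 1
    · subst h
      have harith : a - 1 - (((a - 1) :: xs).length : Int) = (a - 1) - 1 - (xs.length : Int) := by
        simp only [List.length_cons]; push_cast; ring
      rw [harith]
      simpa [descLoop] using ih (a - 1)
    · constructor
      · intro hc; simp [descLoop, h] at hc
      · intro hc
        have hx : x :: xs = PySem.List.pyRange (a - 1) (a - 1 - ((x :: xs).length : Int)) (-1) := by
          simpa using hc
        have h1 : (0 : Int) < ((x :: xs).length : Int) := by simp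
        have hlt2 : a - 1 - ((x :: xs).length : Int) < a - 1 := by omega
        rw [PySem.List.pyRange_neg_one_cons hlt2] at hx
        exact absurd (by simpa using congrArg (fun l => l.headD 0) hx) h

lemma check_cons (h : Int) (t : List Int) :
    check (h :: t) = if h = 1 then ascLoop h t else if h = 8 then descLoop h t else "mixed" := rfl

lemma check_alt_cons (h : Int) (t : List Int) :
    check_alt (h :: t) =
      if h = 1 then
        if h :: t = PySem.List.pyRange 1 (((h :: t).length : Int) + 1) 1 then "ascending" else "mixed"
      else if h = 8 then
        if h :: t = PySem.List.pyRange 8 (8 - ((h :: t).length : Int)) (-1) then "descending" else "mixed"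
      else "mixed" := rfl

-- ===== VERDICT (by name: the statement is the Claim_ definition above) =====
theorem check_spec : Claim_equal_check := by
  intro list _ hpre
  unfold Spec_check
  match list with
  | [] => exact absurd rfl hpre
  | h :: t =>
    rw [check_cons, check_alt_cons]
    by_cases h1 : h = 1
    · subst h1
      rw [if_pos rfl, if_pos rfl]
      have hr : (1 : Int) + 1 + (t.length : Int) = (((1 : Int) :: t).length : Int) + 1 := by
        simp only [List.length_cons]; push_cast; ring
      rcases ascLoop_eq_or 1 t with hA | hA
      · have hc : (1 : Int) :: t = PySem.List.pyRange 1 ((((1 : Int) :: t).length : Int) + 1) 1 := by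
          rw [← hr]; exact (asc_iff t 1).mp hA
        rw [hA, if_pos hc]
      · have hc : ¬((1 : Int) :: t = PySem.List.pyRange 1 ((((1 : Int) :: t).length : Int) + 1) 1) := by
          intro hc
          rw [← hr] at hc
          have := (asc_iff t 1).mpr hc
          exact absurd (this.symm.trans hA) (by decide)
        rw [hA, if_neg hc]
    · rw [if_neg h1, if_neg h1]
      by_cases h8 : h = 8
      · subst h8
        rw [if_pos rfl, if_pos rfl]
        have hr : (8 : Int) - 1 - (t.length : Int) = 8 - ((((8 : Int) :: t).length : Int)) := by
          simp only [List.length_cons]; push_cast; ring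
        rcases descLoop_eq_or 8 t with hA | hA
        · have hc : (8 : Int) :: t = PySem.List.pyRange 8 (8 - ((((8 : Int) :: t).length : Int))) (-1) := by
            rw [← hr]; exact (desc_iff t 8).mp hA
          rw [hA, if_pos hc]
        · have hc : ¬((8 : Int) :: t = PySem.List.pyRange 8 (8 - ((((8 : Int) :: t).length : Int))) (-1)) := by
            intro hc
            rw [← hr] at hc
            have := (desc_iff t 8).mpr hc
            exact absurd (this.symm.trans hA) (by decide)
          rw [hA, if_neg hc]
      · rw [if_neg h8, if_neg h8]
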